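-- pv_equiv track=rewrite | github.com/alexandraback/datacollection | solutions_5636311922769920_1/Python/RinMin/pd.py | check_tiles
-- ===== SOURCE A (Python) =====
-- def check_tiles(n, depth, check):
-- 	i = 0
-- 	tiles = []
-- 	while i < n:
-- 		tile = 0
-- 		p = 0
-- 		while i < n and p < depth:
-- 			tile = tile + i * int(pow(n, p))
-- 			i = i + 1
-- 			p = p + 1
-- 		tiles.append(tile+1)
-- 	if check < len(tiles):
-- 		return "IMPOSSIBLE"
-- 	else:
-- 		return " ".join(str(tile) for tile in tiles)
-- ===== SOURCE B (Python) =====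
-- def _geom_sums(n, L):
--     # S0 = sum_{p<L} n**p, S1 = sum_{p<L} p * n**p, via one running power
--     S0 = 0
--     S1 = 0
--     pw = 1
--     for p in range(L):
--         S0 += pw
--         S1 += p * pw
--         pw *= n
--     return S0, S1
--
-- def check_tiles(n, depth, check):
--     if n <= 0:
--         return "IMPOSSIBLE" if check < 0 else ""
--     r = n % depth
--     full = depth if depth < n else n
--     S0, S1 = _geom_sums(n, full)      # sums for a full-length chunk
--     S0r, S1r = _geom_sums(n, r)       # sums for the short final chunk (if any)
--     tiles = [s * S0 + S1 + 1 if s + depth <= n else s * S0r + S1r + 1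
--              for s in range(0, n, depth)]
--     if check < len(tiles):
--         return "IMPOSSIBLE"
--     return " ".join(str(t) for t in tiles)
-- ===== Notes on version B (the rewrite author's own statement) =====
-- stated objective: alternative
-- what changed: Instead of accumulating i*n**p element by element over all n indices, B precomputes the chunk sums S0=sum n^p and S1=sum p*n^p once per chunk length and emits each tile as start*S0+S1+1, one step per chunk; on very large inputs both are dominated by the bignum size of the output.
import Mathlib
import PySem

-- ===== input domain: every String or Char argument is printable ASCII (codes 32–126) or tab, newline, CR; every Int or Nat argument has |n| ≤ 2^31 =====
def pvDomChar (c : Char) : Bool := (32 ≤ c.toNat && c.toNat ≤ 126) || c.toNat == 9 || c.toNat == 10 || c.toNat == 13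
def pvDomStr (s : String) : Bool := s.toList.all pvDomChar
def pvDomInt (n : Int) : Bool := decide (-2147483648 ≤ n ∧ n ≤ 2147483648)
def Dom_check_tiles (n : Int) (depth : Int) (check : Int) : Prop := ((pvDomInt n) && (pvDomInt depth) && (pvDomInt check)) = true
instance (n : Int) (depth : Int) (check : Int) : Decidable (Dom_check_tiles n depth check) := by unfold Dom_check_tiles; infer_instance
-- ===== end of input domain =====

-- B replaces A's element-by-element accumulation by closed chunk sums: S0 = Σ n^p and S1 = Σ p·n^p are
-- computed once per chunk length and each tile is start·S0 + S1 + 1, one step per chunk instead of per element.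

-- ===== PORT A =====
-- inner while loop: while i < n and p < depth: tile += i * n**p; i += 1; p += 1   → returns (tile, i)
def innerA (n depth : Int) (i tile p : Int) : Int × Int :=
  if h : i < n ∧ p < depth then
    innerA n depth (i + 1) (tile + i * n ^ p.toNat) (p + 1)
  else (tile, i)
termination_by (depth - p).toNat
decreasing_by omega

-- outer while loop: while i < n: … tiles.append(tile+1).  Fuel n.toNat bounds the iterations
-- (each iteration advances i by ≥ 1 whenever 0 < depth; for depth ≤ 0 < n Python A never returns — excluded by Pre_).
def outerA (n depth : Int) (fuel : Nat) (i : Int) (tiles : List Int) : List Int :=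
  match fuel with
  | 0 => tiles
  | Nat.succ f =>
    if i < n then
      let t := innerA n depth i 0 0
      outerA n depth f t.2 (tiles ++ [t.1 + 1])
    else tiles

def check_tiles (n : Int) (depth : Int) (check : Int) : String :=
  let tiles := outerA n depth n.toNat 0 []
  if check < (tiles.length : Int) then "IMPOSSIBLE"
  else PySem.Str.join " " (tiles.map PySem.Int.toStr)

-- ===== PORT B =====
-- _geom_sums: S0 = Σ_{p<L} n^p, S1 = Σ_{p<L} p·n^p with one running power (the for-loop is the foldl)
def geomStep (n : Int) (acc : Int × Int × Int) (p : Int) : Int × Int × Int :=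
  (acc.1 + acc.2.2, acc.2.1 + p * acc.2.2, acc.2.2 * n)

def geomSums (n L : Int) : Int × Int :=
  let t := (PySem.List.pyRange 0 L 1).foldl (geomStep n) (0, 0, 1)
  (t.1, t.2.1)

def check_tiles_alt (n : Int) (depth : Int) (check : Int) : String :=
  if n ≤ 0 then (if check < 0 then "IMPOSSIBLE" else "")
  else
    let r := PySem.Int.mod n depth
    let full := if depth < n then depth else n
    let s01 := geomSums n full
    let s01r := geomSums n r
    let tiles := (PySem.List.pyRange 0 n depth).map
      (fun s => if s + depth ≤ n then s * s01.1 + s01.2 + 1 else s * s01r.1 + s01r.2 + 1)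
    if check < (tiles.length : Int) then "IMPOSSIBLE"
    else PySem.Str.join " " (tiles.map PySem.Int.toStr)

-- ===== PRECONDITION & SPEC =====
-- Pre_ excludes only 0 < n with depth ≤ 0, where Python A never returns (its outer loop never advances i).
def Pre_check_tiles (n : Int) (depth : Int) (check : Int) : Prop := n ≤ 0 ∨ 0 < depth
instance (n : Int) (depth : Int) (check : Int) : Decidable (Pre_check_tiles n depth check) := by unfold Pre_check_tiles; infer_instance
def pvWitness_check_tiles : Int × Int × Int := (10, 3, 4)

def Spec_check_tiles (n : Int) (depth : Int) (check : Int) (out : String) : Prop := out = check_tiles_alt n depth check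
instance (n : Int) (depth : Int) (check : Int) (out : String) : Decidable (Spec_check_tiles n depth check out) := by unfold Spec_check_tiles; infer_instance

-- ===== CLAIM =====
def Claim_equal_check_tiles : Prop := ∀ (n : Int) (depth : Int) (check : Int), Dom_check_tiles n depth check → Pre_check_tiles n depth check → Spec_check_tiles n depth check (check_tiles n depth check)

-- ===== LEMMAS AND PROOFS =====

theorem innerA_spec (n depth : Int) (p i tile : Int) (hp : 0 ≤ p) :
    innerA n depth i tile p =
      (tile + ∑ j ∈ Finset.range (min (n - i).toNat (depth - p).toNat), (i + j) * n ^ (p.toNat + j),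
       i + min (n - i).toNat (depth - p).toNat) := by
  rw [innerA]
  by_cases h : i < n ∧ p < depth
  · rw [dif_pos h, innerA_spec n depth (p + 1) (i + 1) _ (by omega)]
    have hM : min (n - i).toNat (depth - p).toNat
        = min (n - (i + 1)).toNat (depth - (p + 1)).toNat + 1 := by omega
    have hpt : (p + 1).toNat = p.toNat + 1 := by omega
    rw [hM, Finset.sum_range_succ']
    refine Prod.ext ?_ (by simp; omega)
    have hsum : ∑ j ∈ Finset.range (min (n - (i + 1)).toNat (depth - (p + 1)).toNat),
          (i + 1 + (j : Int)) * n ^ ((p + 1).toNat + j)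
        = ∑ j ∈ Finset.range (min (n - (i + 1)).toNat (depth - (p + 1)).toNat),
          (i + ((j : Int) + 1)) * n ^ (p.toNat + (j + 1)) := by
      apply Finset.sum_congr rfl
      intro j _
      rw [hpt, show p.toNat + 1 + j = p.toNat + (j + 1) from by omega]
      ring_nf
    simp only [hsum]
    push_cast
    ring
  · rw [dif_neg h]
    have h0 : min (n - i).toNat (depth - p).toNat = 0 := by omega
    simp [h0]
termination_by (depth - p).toNat
decreasing_by omega

theorem geomAux (n : Int) (m : Nat) :
    (PySem.List.pyRange 0 (m : Int) 1).foldl (geomStep n) (0, 0, 1) =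
      (∑ j ∈ Finset.range m, n ^ j, ∑ j ∈ Finset.range m, (j : Int) * n ^ j, n ^ m) := by
  induction m with
  | zero => simp [PySem.List.pyRange_one_eq_nil]
  | succ m ih =>
    have hcast : ((m + 1 : Nat) : Int) = (m : Int) + 1 := by push_cast; ring
    rw [hcast, PySem.List.pyRange_one_succ_right (by positivity), List.foldl_append, ih]
    simp [geomStep, Finset.sum_range_succ, pow_succ]

theorem geomSums_eq (n L : Int) (h : 0 ≤ L) :
    geomSums n L = (∑ j ∈ Finset.range L.toNat, n ^ j, ∑ j ∈ Finset.range L.toNat, (j : Int) * n ^ j) := by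
  have hL : (L : Int) = ((L.toNat : Nat) : Int) := by omega
  rw [geomSums, hL, geomAux, Int.toNat_natCast]

theorem chunk_split (n i : Int) (M : Nat) :
    ∑ j ∈ Finset.range M, (i + (j : Int)) * n ^ j
      = i * (∑ j ∈ Finset.range M, n ^ j) + ∑ j ∈ Finset.range M, (j : Int) * n ^ j := by
  rw [Finset.mul_sum, ← Finset.sum_add_distrib]
  exact Finset.sum_congr rfl (fun j _ => by ring)

theorem outerA_stop (n depth : Int) (fuel : Nat) (i : Int) (acc : List Int) (h : ¬ i < n) :
    outerA n depth fuel i acc = acc := by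
  cases fuel with
  | zero => rfl
  | succ f => simp [outerA, h]

-- ⌈n/depth⌉ = q + (1 if r ≠ 0 else 0)
theorem cnt_eq (n depth : Int) (hd : 0 < depth) :
    (n + depth - 1) / depth
      = PySem.Int.floordiv n depth + (if PySem.Int.mod n depth = 0 then 0 else 1) := by
  have hqr := PySem.Int.floordiv_mul_add_mod n depth
  have hr0 : 0 ≤ PySem.Int.mod n depth := PySem.Int.mod_nonneg n hd
  have hrd : PySem.Int.mod n depth < depth := PySem.Int.mod_lt n hd
  set q := PySem.Int.floordiv n depth
  set r := PySem.Int.mod n depth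
  have h1 : n + depth - 1 = (r + depth - 1) + q * depth := by omega
  rw [h1, Int.add_mul_ediv_right _ _ (by omega)]
  by_cases hrz : r = 0
  · rw [if_pos hrz, hrz, Int.ediv_eq_zero_of_lt (by omega) (by omega)]
    ring
  · rw [if_neg hrz, show r + depth - 1 = (r - 1) + 1 * depth from by ring,
        Int.add_mul_ediv_right _ _ (by omega), Int.ediv_eq_zero_of_lt (by omega) (by omega)]
    ring

-- a chunk start i with i < n < i + depth is the last one: n - i = n % depth
theorem last_chunk (n depth i : Int) (hd : 0 < depth) (hdvd : depth ∣ i)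
    (h1 : i < n) (h2 : n < i + depth) : n - i = PySem.Int.mod n depth := by
  have hqr := PySem.Int.floordiv_mul_add_mod n depth
  have hr0 : 0 ≤ PySem.Int.mod n depth := PySem.Int.mod_nonneg n hd
  have hrd : PySem.Int.mod n depth < depth := PySem.Int.mod_lt n hd
  set q := PySem.Int.floordiv n depth
  set r := PySem.Int.mod n depth
  have hdvd2 : depth ∣ (i - q * depth) := dvd_sub hdvd (Dvd.intro_left q rfl)
  have habs : |i - q * depth| < depth := by
    rw [abs_lt]
    constructor <;> linarith
  have hz := Int.eq_zero_of_abs_lt_dvd hdvd2 habs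
  linarith

-- main outer-loop lemma: from chunk start depth·k with c chunks remaining,
-- A's loop appends exactly the c remaining tiles of B's list
theorem outerA_spec (n depth : Int) (hd : 0 < depth) (hn : 0 < n)
    (tb : Int → Int)
    (htb : ∀ i : Int, 0 ≤ i → i < n → depth ∣ i → (innerA n depth i 0 0).1 + 1 = tb i) :
    ∀ (c : Nat), ∀ (k : Nat) (fuel : Nat) (acc : List Int),
      (k : Int) + (c : Int) = PySem.Int.floordiv n depth + (if PySem.Int.mod n depth = 0 then 0 else 1) →
      c ≤ fuel →
      outerA n depth fuel (depth * k) acc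
        = acc ++ (List.range c).map (fun j : Nat => tb (depth * ((k : Int) + (j : Int)))) := by
  have hqr := PySem.Int.floordiv_mul_add_mod n depth
  have hr0 : 0 ≤ PySem.Int.mod n depth := PySem.Int.mod_nonneg n hd
  have hrd : PySem.Int.mod n depth < depth := PySem.Int.mod_lt n hd
  set q := PySem.Int.floordiv n depth with hq
  set r := PySem.Int.mod n depth with hr
  intro c
  induction c with
  | zero =>
    intro k fuel acc hk _
    have hni : ¬ depth * (k : Int) < n := by
      by_cases hrz : r = 0
      · rw [if_pos hrz] at hk
        have hkq : (k : Int) = q := by omega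
        rw [hkq, mul_comm]
        omega
      · rw [if_neg hrz] at hk
        have hkq : (k : Int) = q + 1 := by omega
        rw [hkq]
        have : depth * (q + 1) = q * depth + depth := by ring
        omega
    rw [outerA_stop n depth fuel _ acc hni]
    simp
  | succ c ih =>
    intro k fuel acc hk hfuel
    have hk0 : (0 : Int) ≤ (k : Int) := by positivity
    have hq0 : 0 ≤ q := by
      rw [hq, PySem.Int.floordiv_eq_ediv_of_pos hd]
      exact Int.ediv_nonneg (by omega) (by omega)
    have hilt : depth * (k : Int) < n := by
      have hkq : (k : Int) ≤ q - 1 + (if r = 0 then 0 else 1) := by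
        by_cases hrz : r = 0 <;> simp [hrz] at hk ⊢ <;> omega
      by_cases hrz : r = 0
      · rw [if_pos hrz] at hkq
        have := mul_le_mul_of_nonneg_left hkq (le_of_lt hd)
        have : depth * (q - 1) = q * depth - depth := by ring
        nlinarith
      · rw [if_neg hrz] at hkq
        have h1 : depth * (k : Int) ≤ depth * q := mul_le_mul_of_nonneg_left (by omega) (le_of_lt hd)
        have h2 : depth * q = q * depth := mul_comm _ _
        omega
    obtain ⟨f, rfl⟩ : ∃ f, fuel = f + 1 := ⟨fuel - 1, by omega⟩
    have hi0 : (0 : Int) ≤ depth * (k : Int) := mul_nonneg (le_of_lt hd) hk0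
    have hdvdi : depth ∣ depth * (k : Int) := dvd_mul_right _ _
    simp only [outerA, if_pos hilt]
    rw [htb _ hi0 hilt hdvdi, innerA_spec n depth 0 (depth * (k : Int)) 0 le_rfl]
    dsimp only
    by_cases hfull : depth * (k : Int) + depth ≤ n
    · have hMd : min (n - depth * (k : Int)).toNat (depth - 0).toNat = depth.toNat := by omega
      rw [hMd]
      have hnext : depth * (k : Int) + (depth.toNat : Int) = depth * (((k + 1 : Nat)) : Int) := by
        rw [Int.toNat_of_nonneg (le_of_lt hd)]; push_cast; ring
      rw [hnext, ih (k + 1) f _ (by push_cast at hk ⊢; omega) (by omega)]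
      rw [List.append_assoc, List.singleton_append]
      congr 1
      rw [List.range_succ_eq_map, List.map_cons, List.map_map]
      refine congrArg₂ List.cons (by norm_num) ?_
      apply List.map_congr_left
      intro j _
      simp only [Function.comp_apply]
      congr 1
      push_cast
      ring
    · have hnr : n - depth * (k : Int) = r :=
        last_chunk n depth _ hd hdvdi hilt (by omega)
      have hrne : r ≠ 0 := by omega
      rw [if_neg hrne] at hk
      have hkq : (k : Int) = q := by
        have h2 : q * depth = depth * q := mul_comm _ _
        have h1 : depth * (k : Int) = depth * q := by omega
        exact mul_left_cancel₀ (by omega) h1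
      have hc0 : c = 0 := by omega
      subst hc0
      have hMr : min (n - depth * (k : Int)).toNat (depth - 0).toNat = r.toNat := by omega
      rw [hMr]
      have hi' : depth * (k : Int) + (r.toNat : Int) = n := by omega
      rw [hi', outerA_stop n depth f n _ (by omega)]
      have hone : ((List.range 1).map (fun j : Nat => tb (depth * ((k : Int) + (j : Int))))) 
          = [tb (depth * (k : Int))] := by simp
      rw [hone]

theorem check_tiles_spec_lists (n depth : Int) (hd : 0 < depth) (hn : 0 < n) :
    outerA n depth n.toNat 0 []
      = (PySem.List.pyRange 0 n depth).map
          (fun s => if s + depth ≤ n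
            then s * (geomSums n (if depth < n then depth else n)).1
                 + (geomSums n (if depth < n then depth else n)).2 + 1
            else s * (geomSums n (PySem.Int.mod n depth)).1
                 + (geomSums n (PySem.Int.mod n depth)).2 + 1) := by
  have hqr := PySem.Int.floordiv_mul_add_mod n depth
  have hr0 : 0 ≤ PySem.Int.mod n depth := PySem.Int.mod_nonneg n hd
  have hrd : PySem.Int.mod n depth < depth := PySem.Int.mod_lt n hd
  set q := PySem.Int.floordiv n depth with hq
  set r := PySem.Int.mod n depth with hr
  have hq0 : 0 ≤ q := by
    rw [hq, PySem.Int.floordiv_eq_ediv_of_pos hd]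
    exact Int.ediv_nonneg (by omega) (by omega)
  set tb : Int → Int := fun s => if s + depth ≤ n
      then s * (geomSums n (if depth < n then depth else n)).1
           + (geomSums n (if depth < n then depth else n)).2 + 1
      else s * (geomSums n r).1 + (geomSums n r).2 + 1 with htbdef
  have hfull_eq : ∀ i : Int, 0 ≤ i → i + depth ≤ n → (if depth < n then depth else n) = depth := by
    intro i h0 h1
    split <;> omega
  have htb : ∀ i : Int, 0 ≤ i → i < n → depth ∣ i → (innerA n depth i 0 0).1 + 1 = tb i := by
    intro i h0 h1 hdvd
    rw [innerA_spec n depth 0 i 0 le_rfl, htbdef]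
    dsimp only
    simp only [Int.toNat_zero, zero_add, sub_zero]
    by_cases hfl : i + depth ≤ n
    · have hM : min (n - i).toNat depth.toNat = depth.toNat := by omega
      rw [if_pos hfl, hfull_eq i h0 hfl, geomSums_eq n depth (le_of_lt hd), hM, chunk_split]
    · have hnr : n - i = r := last_chunk n depth i hd hdvd h1 (by omega)
      have hM : min (n - i).toNat depth.toNat = r.toNat := by omega
      rw [if_neg hfl, geomSums_eq n r hr0, hM, chunk_split]
  set C : Nat := ((n - 0 + depth - 1) / depth).toNat with hC
  have hCq : ((n + depth - 1) / depth) = q + (if r = 0 then 0 else 1) := cnt_eq n depth hd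
  have hCe : (C : Int) = q + (if r = 0 then 0 else 1) := by
    rw [hC, show n - 0 + depth - 1 = n + depth - 1 from by ring, hCq]
    have : (0:Int) ≤ q + (if r = 0 then 0 else 1) := by split <;> omega
    omega
  have hCn : (C : Int) ≤ n := by
    have hqd : q ≤ q * depth := le_mul_of_one_le_right hq0 (by omega)
    by_cases hrz : r = 0
    · rw [hrz, if_pos rfl] at hCe; omega
    · rw [if_neg hrz] at hCe; omega
  have houter := outerA_spec n depth hd hn tb htb C 0 n.toNat []
    (by simpa using hCe) (by omega)
  have hrange : PySem.List.pyRange 0 n depth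
      = (List.range C).map (fun k : Nat => (0 : Int) + depth * (k : Int)) := by
    rw [PySem.List.pyRange_of_pos 0 n hd, if_pos hn]
  have houter' : outerA n depth n.toNat 0 []
      = List.map (fun j : Nat => tb (depth * (j : Int))) (List.range C) := by
    simpa using houter
  rw [hrange, List.map_map, houter']
  apply List.map_congr_left
  intro j _
  simp [Function.comp]

-- ===== VERDICT =====
theorem check_tiles_spec : Claim_equal_check_tiles := by
  intro n depth check _ hpre
  unfold Spec_check_tiles
  by_cases hn : n ≤ 0
  · have h0 : n.toNat = 0 := by omega
    simp only [check_tiles, check_tiles_alt, h0, if_pos hn]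
    rfl
  · have hn' : 0 < n := by omega
    have hd : 0 < depth := hpre.resolve_left (by omega)
    simp only [check_tiles, check_tiles_alt, if_neg (show ¬ n ≤ 0 by omega)]
    rw [check_tiles_spec_lists n depth hd hn']
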